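-- pv_equiv track=rewrite | github.com/joshtyler/delay-line | software/uart_msg_const_gen/uart_msg_const_gen.py | cpp_gen_mask
-- ===== SOURCE A (Python) =====
-- word_len = 8  # We use bytes
--
-- def cpp_gen_mask(low_keep, high_keep):
--     arr = ''
--     for i in range(0, word_len):
--         if i >= low_keep and i <= high_keep :
--             val = '1'
--         else:
--             val = '0'
--         arr = val + arr
--     return arr
-- ===== SOURCE B (Python) =====
-- word_len = 8  # We use bytes
--
-- def cpp_gen_mask(low_keep, high_keep):
--     lo = max(low_keep, 0)
--     hi = min(high_keep, word_len - 1)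
--     value = ((1 << (hi - lo + 1)) - 1) << lo if lo <= hi else 0
--     return format(value, '08b')
-- ===== Notes on version B (the rewrite author's own statement) =====
-- stated objective: alternative
-- what changed: Replaces the per-position prepend loop over all 8 bit positions with a closed-form bitmask built from clamped bounds by shifts, then formatted as an 8-digit binary string.
import Mathlib
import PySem

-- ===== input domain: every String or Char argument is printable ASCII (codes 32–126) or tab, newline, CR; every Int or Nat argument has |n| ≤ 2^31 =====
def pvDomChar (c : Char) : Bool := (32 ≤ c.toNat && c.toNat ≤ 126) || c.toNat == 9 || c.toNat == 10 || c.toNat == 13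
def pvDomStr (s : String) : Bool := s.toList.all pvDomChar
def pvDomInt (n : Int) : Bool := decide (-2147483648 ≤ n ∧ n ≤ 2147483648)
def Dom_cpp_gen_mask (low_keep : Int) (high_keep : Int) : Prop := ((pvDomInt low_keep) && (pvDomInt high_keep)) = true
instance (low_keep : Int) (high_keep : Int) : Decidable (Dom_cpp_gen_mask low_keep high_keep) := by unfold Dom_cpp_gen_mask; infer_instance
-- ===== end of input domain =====

-- B builds the mask as one shifted integer from clamped bounds and formats it in binary,
-- instead of A's per-position comparison loop that prepends a character for each of the 8 bits.

-- ===== PORT A =====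
-- arr = val + arr, looping i over range(0, 8)
def cpp_gen_mask (low_keep : Int) (high_keep : Int) : String :=
  (PySem.List.pyRange 0 8 1).foldl
    (fun arr i =>
      (if low_keep ≤ i ∧ i ≤ high_keep then "1" else "0") ++ arr)
    ""

-- ===== PORT B =====
-- format(value, '08b'): 8 binary digits, MSB first (ported by hand, exact for 0 ≤ value < 256)
def pvFormat08b (value : Int) : String :=
  String.ofList (((List.range 8).reverse).map
    (fun bit => if (value / 2 ^ bit) % 2 = 1 then '1' else '0'))

def cpp_gen_mask_alt (low_keep : Int) (high_keep : Int) : String :=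
  let lo := max low_keep 0
  let hi := min high_keep (8 - 1)
  -- ((1 << (hi - lo + 1)) - 1) << lo, shifts ported as multiplication by powers of two
  let value : Int := if lo ≤ hi then (2 ^ (hi - lo + 1).toNat - 1) * 2 ^ lo.toNat else 0
  pvFormat08b value

-- ===== PRECONDITION & SPEC =====
def Spec_cpp_gen_mask (low_keep : Int) (high_keep : Int) (out : String) : Prop := out = cpp_gen_mask_alt low_keep high_keep
instance (low_keep : Int) (high_keep : Int) (out : String) : Decidable (Spec_cpp_gen_mask low_keep high_keep out) := by unfold Spec_cpp_gen_mask; infer_instance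

-- ===== CLAIM (what is proved, stated in full; the proofs are below) =====
def Claim_equal_cpp_gen_mask : Prop := ∀ (low_keep : Int) (high_keep : Int), Dom_cpp_gen_mask low_keep high_keep → Spec_cpp_gen_mask low_keep high_keep (cpp_gen_mask low_keep high_keep)

-- ===== LEMMAS AND PROOFS =====

-- A only tests low_keep ≤ i and i ≤ high_keep for i ∈ {0,…,7}, so it is invariant
-- under clamping low_keep to [0,8] and high_keep to [-1,7].
theorem cpp_gen_mask_clamp (low high : Int) :
    cpp_gen_mask low high
      = cpp_gen_mask (max 0 (min low 8)) (max (-1) (min high 7)) := by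
  have h : ∀ i : Int, 0 ≤ i → i ≤ 7 →
      ((low ≤ i ∧ i ≤ high) = ((max 0 (min low 8)) ≤ i ∧ i ≤ max (-1) (min high 7))) := by
    intro i h0 h7; apply propext; constructor <;> intro hc <;> omega
  have hr : PySem.List.pyRange 0 8 1 = [0, 1, 2, 3, 4, 5, 6, 7] := by decide
  simp only [cpp_gen_mask, hr, List.foldl]
  simp only [h 0 (by norm_num) (by norm_num), h 1 (by norm_num) (by norm_num),
      h 2 (by norm_num) (by norm_num), h 3 (by norm_num) (by norm_num),
      h 4 (by norm_num) (by norm_num), h 5 (by norm_num) (by norm_num),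
      h 6 (by norm_num) (by norm_num), h 7 (by norm_num) (by norm_num)]

-- B is likewise invariant under the same clamping.
theorem cpp_gen_mask_alt_clamp (low high : Int) :
    cpp_gen_mask_alt low high
      = cpp_gen_mask_alt (max 0 (min low 8)) (max (-1) (min high 7)) := by
  unfold cpp_gen_mask_alt
  by_cases hc : max low 0 ≤ min high (8 - 1)
  · have hlo : max low 0 = max (max 0 (min low 8)) 0 := by omega
    have hhi : min high (8 - 1) = min (max (-1) (min high 7)) (8 - 1) := by omega
    have hc' : max (max 0 (min low 8)) 0 ≤ min (max (-1) (min high 7)) (8 - 1) := by omega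
    simp only [if_pos hc, if_pos hc', hlo, hhi]
  · have hc' : ¬ max (max 0 (min low 8)) 0 ≤ min (max (-1) (min high 7)) (8 - 1) := by omega
    simp only [if_neg hc, if_neg hc']

-- On the clamped grid the two programs agree, checked exhaustively (90 cases).
theorem clamped_agree :
    ∀ L ∈ Finset.Icc (0 : Int) 8, ∀ H ∈ Finset.Icc (-1 : Int) 7,
      cpp_gen_mask L H = cpp_gen_mask_alt L H := by decide

-- ===== VERDICT (by name: the statement is the Claim_ definition above) =====
theorem cpp_gen_mask_spec : Claim_equal_cpp_gen_mask := by
  intro low high _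
  unfold Spec_cpp_gen_mask
  rw [cpp_gen_mask_clamp, cpp_gen_mask_alt_clamp]
  exact clamped_agree _ (Finset.mem_Icc.mpr (by omega)) _ (Finset.mem_Icc.mpr (by omega))
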